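-- pv_equiv track=rewrite | github.com/not-in-scope/nfl-sparq-2026 | scripts/sources/mockdraft.py | assign_mock_rounds
-- ===== SOURCE A (Python) =====
-- ROUND_RANGES = [
--     (1,   32,  1),
--     (33,  64,  2),
--     (65,  96,  3),
--     (97,  128, 4),
--     (129, 192, 5),
--     (193, 224, 6),
--     (225, 257, 7),
-- ]
--
-- def assign_mock_rounds(board: dict) -> dict:
--     for name, data in board.items():
--         rank = data.get('rank')
--         data['draft_round'] = None
--         data['draft_pick'] = None
--         if rank is None:
--             continue
--         for lo, hi, rnd in ROUND_RANGES:
--             if lo <= rank <= hi: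
--                 data['draft_round'] = rnd
--                 data['draft_pick'] = rank
--                 break
--     return board
-- ===== SOURCE B (Python) =====
-- # B: replace the linear scan over ROUND_RANGES by a binary search over the
-- # round high-cutoffs; rounds are contiguous 1..257, so round = index + 1.
-- _CUTOFFS = [32, 64, 96, 128, 192, 224, 257]
--
--
-- def _bisect_left(a, x):
--     lo, hi = 0, len(a)
--     while lo < hi:
--         mid = (lo + hi) // 2
--         if a[mid] < x:
--             lo = mid + 1
--         else:
--             hi = mid
--     return lo
--
--
-- def assign_mock_rounds(board: dict) -> dict:
--     for data in board.values():
--         rank = data.get('rank')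
--         if rank is not None and 1 <= rank <= 257:
--             data['draft_round'] = _bisect_left(_CUTOFFS, rank) + 1
--             data['draft_pick'] = rank
--         else:
--             data['draft_round'] = None
--             data['draft_pick'] = None
--     return board
-- ===== Notes on version B (the rewrite author's own statement) =====
-- stated objective: alternative
-- what changed: The per-player linear scan over the seven (lo,hi,round) ranges is replaced by a binary search over the sorted round high-cutoffs, mapping the found index to the round; validity is one check 1 <= rank <= 257 instead of seven range tests.
import Mathlib
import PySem

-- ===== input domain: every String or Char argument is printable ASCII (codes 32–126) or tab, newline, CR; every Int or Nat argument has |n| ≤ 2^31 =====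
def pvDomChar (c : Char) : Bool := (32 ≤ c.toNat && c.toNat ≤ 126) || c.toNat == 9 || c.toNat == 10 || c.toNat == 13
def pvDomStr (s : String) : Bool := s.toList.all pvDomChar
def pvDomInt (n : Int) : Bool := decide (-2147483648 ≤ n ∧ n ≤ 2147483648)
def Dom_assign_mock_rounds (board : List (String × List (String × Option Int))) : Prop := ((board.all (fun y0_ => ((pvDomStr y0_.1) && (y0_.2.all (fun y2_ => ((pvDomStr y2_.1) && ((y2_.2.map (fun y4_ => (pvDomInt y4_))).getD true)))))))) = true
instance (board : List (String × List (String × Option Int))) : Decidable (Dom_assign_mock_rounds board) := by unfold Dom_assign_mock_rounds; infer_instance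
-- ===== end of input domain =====

-- B replaces A's linear scan over the seven draft ranges by a binary search over
-- the sorted round high-cutoffs (alternative algorithm, same observable result).
-- Both Pythons mutate the inner dicts in place and return the board; the ports
-- model that as the returned value (the per-entry dict after the assignments).

-- ===== PORT A =====
def roundRanges : List (Int × Int × Int) :=
  [(1, 32, 1), (33, 64, 2), (65, 96, 3), (97, 128, 4), (129, 192, 5), (193, 224, 6), (225, 257, 7)]

-- the inner 'for lo, hi, rnd in ROUND_RANGES: … break' loop of A
def innerLoopA (ranges : List (Int × Int × Int)) (r : Int)
    (d : PySem.Dict String (Option Int)) : PySem.Dict String (Option Int) :=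
  match ranges with
  | [] => d
  | (lo, hi, rnd) :: rest =>
      if lo ≤ r ∧ r ≤ hi then
        (d.insert "draft_round" (some rnd)).insert "draft_pick" (some r)
      else innerLoopA rest r d

-- one iteration of A's outer loop (the mutation of one player's dict)
def stepA (d : PySem.Dict String (Option Int)) : PySem.Dict String (Option Int) :=
  let rank := d.getD "rank" none
  let d1 := (d.insert "draft_round" none).insert "draft_pick" none
  match rank with
  | none => d1
  | some r => innerLoopA roundRanges r d1

def assign_mock_rounds (board : List (String × List (String × Option Int))) :
    List (String × List (String × Option Int)) :=
  board.map (fun p => (p.1, (stepA (PySem.Dict.mk p.2)).items))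

-- ===== PORT B =====
def cutoffs : List Int := [32, 64, 96, 128, 192, 224, 257]

-- Source B's hand-written _bisect_left while-loop; lo/hi/mid are list indices and
-- stay inside [0, len(a)] in the Python, so Nat indexing and getD are exact here
def bisectLoop (a : List Int) (x : Int) (lo hi : Nat) : Nat :=
  if h : lo < hi then
    let mid := (lo + hi) / 2
    if a.getD mid 0 < x then bisectLoop a x (mid + 1) hi else bisectLoop a x lo mid
  else lo
termination_by hi - lo
decreasing_by all_goals omega

def bisectLeft (a : List Int) (x : Int) : Nat := bisectLoop a x 0 a.length

-- one iteration of B's loop over board.values()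
def stepB (d : PySem.Dict String (Option Int)) : PySem.Dict String (Option Int) :=
  match d.getD "rank" none with
  | some r =>
      if 1 ≤ r ∧ r ≤ 257 then
        (d.insert "draft_round" (some ((bisectLeft cutoffs r : Int) + 1))).insert
          "draft_pick" (some r)
      else (d.insert "draft_round" none).insert "draft_pick" none
  | none => (d.insert "draft_round" none).insert "draft_pick" none

def assign_mock_rounds_alt (board : List (String × List (String × Option Int))) :
    List (String × List (String × Option Int)) :=
  board.map (fun p => (p.1, (stepB (PySem.Dict.mk p.2)).items))

-- ===== PRECONDITION & SPEC =====
def Spec_assign_mock_rounds (board : List (String × List (String × Option Int))) (out : List (String × List (String × Option Int))) : Prop := out = assign_mock_rounds_alt board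
instance (board : List (String × List (String × Option Int))) (out : List (String × List (String × Option Int))) : Decidable (Spec_assign_mock_rounds board out) := by unfold Spec_assign_mock_rounds; infer_instance

-- ===== CLAIM (what is proved, stated in full; the proofs are below) =====
def Claim_equal_assign_mock_rounds : Prop := ∀ (board : List (String × List (String × Option Int))), Dom_assign_mock_rounds board → Spec_assign_mock_rounds board (assign_mock_rounds board)

-- ===== LEMMAS AND PROOFS =====

-- replacing key a in a list that has no key a is the identity
theorem map_replace_of_all_ne {κ ν : Type} [BEq κ] (a : κ) (v : ν) :
    ∀ (l : List (κ × ν)), (∀ p ∈ l, (p.1 == a) = false) →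
      l.map (fun p => if p.1 == a then (a, v) else p) = l := by
  intro l h
  induction l with
  | nil => rfl
  | cons q t ih =>
      simp only [List.map_cons, h q List.mem_cons_self, Bool.false_eq_true, if_false,
        ih (fun p hp => h p (List.mem_cons_of_mem _ hp))]

-- overwriting key a after an intermediate insert at b ≠ a equals inserting the
-- final value at a directly (insertion order is preserved either way)
theorem insert_left_comm {κ ν : Type} [BEq κ] [LawfulBEq κ]
    (d : PySem.Dict κ ν) (a b : κ) (h : (b == a) = false) (x y x' : ν) :
    ((d.insert a x).insert b y).insert a x' = (d.insert a x').insert b y := by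
  have hab : (a == b) = false := by
    cases hc : a == b with
    | false => rfl
    | true => have : a = b := eq_of_beq hc; subst this; simp at h
  have hca : ((d.insert a x).insert b y).contains a = true := by
    rw [PySem.Dict.contains_insert, PySem.Dict.contains_insert_self, Bool.or_true]
  have hcb : (d.insert a x).contains b = d.contains b := by
    rw [PySem.Dict.contains_insert, h, Bool.false_or]
  have hcb' : (d.insert a x').contains b = d.contains b := by
    rw [PySem.Dict.contains_insert, h, Bool.false_or]
  apply PySem.Dict.ext
  rw [PySem.Dict.items_insert (((d.insert a x).insert b y)) a x', if_pos hca,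
    PySem.Dict.items_insert (d.insert a x) b y, hcb,
    PySem.Dict.items_insert (d.insert a x') b y, hcb',
    PySem.Dict.items_insert d a x, PySem.Dict.items_insert d a x']
  by_cases ca : d.contains a = true <;> by_cases cb : d.contains b = true <;>
    simp only [ca, cb, if_true, Bool.false_eq_true, if_false, List.map_map,
      List.map_append, List.map_cons, List.map_nil, h, hab, beq_self_eq_true]
  · apply List.map_congr_left
    intro p _
    by_cases hpa : (p.1 == a) = true <;> by_cases hpb : (p.1 == b) = true
    · exact absurd (hab ▸ (eq_of_beq hpa ▸ hpb)) (by simp)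
    · simp [Function.comp, hpa, hab]
    · simp [Function.comp, hpa, hpb, h]
    · simp [Function.comp, hpa, hpb]
  · refine congrArg (· ++ [(b, y)]) ?_
    apply List.map_congr_left
    intro p _
    by_cases hpa : (p.1 == a) = true <;> simp [Function.comp, hpa]
  · have hne : ∀ p ∈ d.items, (p.1 == a) = false := fun p hp => by
      cases hq : (p.1 == a) with
      | false => rfl
      | true =>
          exact absurd (by rw [PySem.Dict.contains]; exact List.any_eq_true.mpr ⟨p, hp, hq⟩) ca
    refine congrArg (· ++ [(a, x')]) ?_
    rw [← List.map_map]
    apply map_replace_of_all_ne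
    intro p hp
    rcases List.mem_map.mp hp with ⟨q, hq, rfl⟩
    have hba : ¬ b = a := by simpa using h
    by_cases hqb : (q.1 == b) = true <;> simp [hqb, hba, hne q hq]
  · have hne : ∀ p ∈ d.items, (p.1 == a) = false := fun p hp => by
      cases hq : (p.1 == a) with
      | false => rfl
      | true =>
          exact absurd (by rw [PySem.Dict.contains]; exact List.any_eq_true.mpr ⟨p, hp, hq⟩) ca
    rw [map_replace_of_all_ne a x' d.items hne, List.append_assoc]

-- A's four inserts (two None placeholders then the two real values) collapse to
-- B's two inserts
theorem normA (d : PySem.Dict String (Option Int)) (v : Option Int) (r : Int) :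
    (((d.insert "draft_round" none).insert "draft_pick" none).insert "draft_round" v).insert
        "draft_pick" (some r)
      = (d.insert "draft_round" v).insert "draft_pick" (some r) := by
  rw [insert_left_comm d "draft_round" "draft_pick" (by decide),
    PySem.Dict.insert_insert_self]

-- the binary search over the seven cutoffs, written out as a decision tree
theorem bisect_char (r : Int) : ((bisectLeft cutoffs r : Nat) : Int) =
    if 128 < r then
      (if 224 < r then (if 257 < r then 7 else 6) else (if 192 < r then 5 else 4))
    else
      (if 64 < r then (if 96 < r then 3 else 2) else (if 32 < r then 1 else 0)) := by
  unfold bisectLeft cutoffs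
  rw [bisectLoop]
  norm_num [List.getD]
  split_ifs <;> (rw [bisectLoop]; norm_num [List.getD]) <;> split_ifs <;>
      (rw [bisectLoop]; norm_num [List.getD]) <;> split_ifs <;>
      (rw [bisectLoop]; norm_num [List.getD])

-- the two per-player updates agree on every dict
theorem step_eq (d : PySem.Dict String (Option Int)) : stepA d = stepB d := by
  unfold stepA stepB
  cases hr : d.getD "rank" none with
  | none => rfl
  | some r =>
      simp only [innerLoopA, roundRanges, normA, bisect_char r]
      split_ifs <;> first | rfl | omega

-- ===== VERDICT (by name: the statement is the Claim_ definition above) =====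
theorem assign_mock_rounds_spec : Claim_equal_assign_mock_rounds := by
  intro board _
  unfold Spec_assign_mock_rounds assign_mock_rounds assign_mock_rounds_alt
  simp [step_eq]
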